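-- pv_equiv track=rewrite | github.com/RomanRudin/bfu_ads_labs | 3.py | find_variants
-- ===== SOURCE A (Python) =====
-- def find_variants(i):
--     variants = []
--     for K in range(int(i/3)+1):
--         for L in range(int(i/5)+1):
--             for M in range(int(i/7)+1):
--                 if 3**K * 5**L * 7**M == i:
--                     variants.append((K, L, M))
--     return variants
-- ===== SOURCE B (Python) =====
-- def find_variants(i):
--     if i < 1:
--         return []
--     n = i
--     k = l = m = 0
--     while n % 3 == 0:
--         n //= 3
--         k += 1
--     while n % 5 == 0:
--         n //= 5
--         l += 1
--     while n % 7 == 0: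
--         n //= 7
--         m += 1
--     return [(k, l, m)] if n == 1 else []
-- ===== Notes on version B (the rewrite author's own statement) =====
-- stated objective: faster
-- what changed: Replaces A's brute-force triple loop over all candidate exponent triples (testing the product of prime powers against i for each) by repeatedly dividing i by each of the three prime bases in turn, counting the divisions and checking the remaining quotient is one.
import Mathlib
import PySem

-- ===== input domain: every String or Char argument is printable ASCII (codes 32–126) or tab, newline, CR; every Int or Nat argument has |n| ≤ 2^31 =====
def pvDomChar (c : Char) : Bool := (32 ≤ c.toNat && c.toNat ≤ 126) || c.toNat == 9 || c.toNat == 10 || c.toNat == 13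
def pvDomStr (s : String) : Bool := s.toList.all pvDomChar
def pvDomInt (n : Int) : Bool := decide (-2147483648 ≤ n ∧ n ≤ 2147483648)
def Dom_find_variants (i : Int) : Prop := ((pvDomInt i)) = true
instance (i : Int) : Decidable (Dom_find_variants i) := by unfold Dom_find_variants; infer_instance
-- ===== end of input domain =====

-- B replaces A's O(i^3) brute-force triple loop by repeated division: strip the factors
-- 3, 5, 7 out of i and check that the quotient is 1 (objective: faster, asymptotic).

-- ===== PORT A =====
-- `int(i/3)` is `PySem.Int.truncdiv i 3` (exact for |i| ≤ 2^31 < 2^53); `3 ** K` with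
-- K drawn from `range(...)` (so 0 ≤ K) is `3 ^ K.toNat`.
def find_variants (i : Int) : List (Int × Int × Int) :=
  (PySem.List.pyRange 0 (PySem.Int.truncdiv i 3 + 1) 1).foldl (fun variants K =>
    (PySem.List.pyRange 0 (PySem.Int.truncdiv i 5 + 1) 1).foldl (fun variants L =>
      (PySem.List.pyRange 0 (PySem.Int.truncdiv i 7 + 1) 1).foldl (fun variants M =>
        if (3:Int) ^ K.toNat * 5 ^ L.toNat * 7 ^ M.toNat == i then variants ++ [(K, L, M)]
        else variants) variants) variants) []

-- ===== PORT B =====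
-- `while n % p == 0: n //= p; c += 1` — fuel-bounded structural recursion; fuel `n.toNat`
-- is enough because n strictly decreases while it stays ≥ 1 (the extra conjuncts
-- `1 ≤ n ∧ 2 ≤ p` only make the recursion total; they hold on every call B makes).
def pyStripGo (p : Int) : Nat → Int → Int → Int × Int
  | 0, n, c => (n, c)
  | fuel+1, n, c =>
    if n % p = 0 ∧ 1 ≤ n ∧ 2 ≤ p then pyStripGo p fuel (n / p) (c + 1) else (n, c)

def pyStrip (p n c : Int) : Int × Int := pyStripGo p n.toNat n c

def find_variants_alt (i : Int) : List (Int × Int × Int) :=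
  if i < 1 then []
  else
    let s3 := pyStrip 3 i 0
    let s5 := pyStrip 5 s3.1 0
    let s7 := pyStrip 7 s5.1 0
    if s7.1 = 1 then [(s3.2, s5.2, s7.2)] else []

-- ===== PRECONDITION & SPEC =====
def Spec_find_variants (i : Int) (out : List (Int × Int × Int)) : Prop := out = find_variants_alt i
instance (i : Int) (out : List (Int × Int × Int)) : Decidable (Spec_find_variants i out) := by unfold Spec_find_variants; infer_instance

-- ===== CLAIM (what is proved, stated in full; the proofs are below) =====
def Claim_equal_find_variants : Prop := ∀ (i : Int), Dom_find_variants i → Spec_find_variants i (find_variants i)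

-- ===== LEMMAS AND PROOFS =====

lemma A_eq (i : Int) : find_variants i =
    (PySem.List.pyRange 0 (PySem.Int.truncdiv i 3 + 1) 1).flatMap (fun K =>
      (PySem.List.pyRange 0 (PySem.Int.truncdiv i 5 + 1) 1).flatMap (fun L =>
        ((PySem.List.pyRange 0 (PySem.Int.truncdiv i 7 + 1) 1).filter
            (fun M => (3:Int) ^ K.toNat * 5 ^ L.toNat * 7 ^ M.toNat == i)).map
          (fun M => (K, L, M)))) := by
  unfold find_variants
  simp only [PySem.List.foldl_append_if, PySem.List.foldl_append_eq_flatMap, List.nil_append]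

-- unique factorisation over the primes 3, 5, 7
lemma pow357_inj (k l m a b c : ℕ) (h : 3^k*5^l*7^m = 3^a*5^b*7^c) : k = a ∧ l = b ∧ m = c := by
  have h3 := congrArg (fun n => n.factorization 3) h
  have h5 := congrArg (fun n => n.factorization 5) h
  have h7 := congrArg (fun n => n.factorization 7) h
  simp [Nat.factorization_mul, Nat.prime_three, Nat.prime_five,
    (by norm_num : Nat.Prime 7)] at h3 h5 h7
  exact ⟨h3, h5, h7⟩

lemma coprime_kill (r k l m : ℕ) (h3 : ¬ 3 ∣ r) (h5 : ¬ 5 ∣ r) (h7 : ¬ 7 ∣ r)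
    (hd : r ∣ 3^k*5^l*7^m) : r = 1 := by
  have c3 : Nat.Coprime r 3 := (((by norm_num : Nat.Prime 3).coprime_iff_not_dvd).mpr h3).symm
  have c5 : Nat.Coprime r 5 := (((by norm_num : Nat.Prime 5).coprime_iff_not_dvd).mpr h5).symm
  have c7 : Nat.Coprime r 7 := (((by norm_num : Nat.Prime 7).coprime_iff_not_dvd).mpr h7).symm
  exact Nat.Coprime.eq_one_of_dvd
    (((c3.pow_right k).mul_right (c5.pow_right l)).mul_right (c7.pow_right m)) hd

lemma mul_le_pow' (p e : ℕ) (hp : 2 ≤ p) (he : 1 ≤ e) : p * e ≤ p ^ e := by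
  induction e with
  | zero => omega
  | succ n ih =>
    rcases Nat.eq_or_lt_of_le he with h | h
    · simp [← h]
    · have hn : 1 ≤ n := by omega
      have := ih hn
      have hpn : p ≤ p ^ n := Nat.le_self_pow (by omega) p
      calc p * (n+1) = p * n + p := by ring
        _ ≤ p ^ n + p ^ n := by omega
        _ ≤ p ^ n * p := by nlinarith
        _ = p ^ (n+1) := by ring

-- the exponent found by stripping fits in A's search range
lemma exp_le_truncdiv (i p : Int) (hi : 1 ≤ i) (hp : 3 ≤ p) (e : ℕ) (hd : p^e ∣ i) :
    (e:ℤ) ≤ PySem.Int.truncdiv i p := by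
  have ht : PySem.Int.truncdiv i p = i / p := Int.tdiv_eq_ediv_of_nonneg (by omega)
  rw [ht, Int.le_ediv_iff_mul_le (by omega)]
  rcases Nat.eq_zero_or_pos e with h0 | h1
  · subst h0; simp; omega
  · have hpe : p ^ e ≤ i := Int.le_of_dvd (by omega) hd
    have : p * e ≤ p ^ e := by
      have hn := mul_le_pow' p.toNat e (by omega) h1
      have : ((p.toNat * e : ℕ) : ℤ) ≤ ((p.toNat ^ e : ℕ) : ℤ) := by exact_mod_cast hn
      push_cast at this
      rwa [Int.toNat_of_nonneg (by omega)] at this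
    nlinarith
lemma stripGo_spec (p : Int) (hp : 2 ≤ p) : ∀ (fuel : ℕ) (n : Int), 1 ≤ n → n.toNat ≤ fuel →
    ∀ c : Int, ∃ (e : ℕ) (r : Int),
      pyStripGo p fuel n c = (r, c + e) ∧ n = p ^ e * r ∧ 1 ≤ r ∧ ¬ p ∣ r := by
  intro fuel
  induction fuel with
  | zero => intro n hn hf; omega
  | succ f ih =>
    intro n hn hf c
    by_cases hd : n % p = 0
    · have hdvd : p ∣ n := Int.dvd_of_emod_eq_zero hd
      obtain ⟨n', rfl⟩ := hdvd
      have hn' : 1 ≤ n' := by nlinarith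
      have hdiv : p * n' / p = n' := Int.mul_ediv_cancel_left _ (by omega)
      have hlt : n'.toNat ≤ f := by
        have : n' < p * n' := by nlinarith
        omega
      obtain ⟨e, r, heq, hfac, hr, hnd⟩ := ih n' hn' hlt (c + 1)
      refine ⟨e + 1, r, ?_, ?_, hr, hnd⟩
      · rw [pyStripGo, if_pos ⟨hd, hn, hp⟩, hdiv, heq]
        congr 1
        push_cast; ring
      · rw [hfac]; ring
    · refine ⟨0, n, ?_, by ring, hn, fun hdvd => hd (Int.emod_eq_zero_of_dvd hdvd)⟩
      rw [pyStripGo, if_neg (by tauto)]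
      simp

lemma strip_spec (p n : Int) (hp : 2 ≤ p) (hn : 1 ≤ n) (c : Int) :
    ∃ (e : ℕ) (r : Int), pyStrip p n c = (r, c + e) ∧ n = p ^ e * r ∧ 1 ≤ r ∧ ¬ p ∣ r :=
  stripGo_spec p hp n.toNat n hn le_rfl c
lemma flatMap_single {β : Type} (l : List Int) (g : Int → List β) (a : Int)
    (hnd : l.Nodup) (ha : a ∈ l) (h : ∀ x ∈ l, x ≠ a → g x = []) : l.flatMap g = g a := by
  induction l with
  | nil => cases ha
  | cons x t ih =>
    rw [List.flatMap_cons]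
    rcases List.mem_cons.mp ha with rfl | hat
    · have hxt : a ∉ t := (List.nodup_cons.mp hnd).1
      have ht : t.flatMap g = [] := List.flatMap_eq_nil_iff.mpr
        (fun y hy => h y (List.mem_cons_of_mem _ hy) (fun hya => hxt (hya ▸ hy)))
      rw [ht, List.append_nil]
    · have hxa : x ≠ a := fun hxa => (List.nodup_cons.mp hnd).1 (hxa ▸ hat)
      rw [h x List.mem_cons_self hxa, List.nil_append]
      exact ih (List.nodup_cons.mp hnd).2 hat (fun y hy hya => h y (List.mem_cons_of_mem _ hy) hya)

lemma filter_single (l : List Int) (p : Int → Bool) (c : Int)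
    (hnd : l.Nodup) (hc : c ∈ l) (h : ∀ x ∈ l, p x = true ↔ x = c) : l.filter p = [c] := by
  have hcongr : l.filter p = l.filter (· == c) := List.filter_congr (fun x hx => by
    by_cases hxc : x = c
    · subst hxc; simp [(h x hx).mpr rfl]
    · have hpx : p x = false := by
        cases hpx : p x
        · rfl
        · exact absurd ((h x hx).mp hpx) hxc
      simp [hpx, hxc])
  rw [hcongr, List.filter_beq, List.count_eq_one_of_mem hnd hc, List.replicate_one]
lemma cond_iff (i : Int) (_hi : 1 ≤ i)
    (e3 e5 e7 : ℕ) (r3 r5 r7 : Int)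
    (hf3 : i = 3 ^ e3 * r3) (hn3 : ¬ (3:ℤ) ∣ r3)
    (hf5 : r3 = 5 ^ e5 * r5) (hn5 : ¬ (5:ℤ) ∣ r5)
    (hf7 : r5 = 7 ^ e7 * r7) (hr7 : 1 ≤ r7) (hn7 : ¬ (7:ℤ) ∣ r7)
    (K L M : Int) (hK : 0 ≤ K) (hL : 0 ≤ L) (hM : 0 ≤ M) :
    (3:Int) ^ K.toNat * 5 ^ L.toNat * 7 ^ M.toNat = i ↔
      r7 = 1 ∧ K = (e3:ℤ) ∧ L = (e5:ℤ) ∧ M = (e7:ℤ) := by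
  have hR : r7 = ((r7.toNat : ℤ)) := (Int.toNat_of_nonneg (by omega)).symm
  constructor
  · intro hEq
    set k := K.toNat with hk
    set l := L.toNat with hl
    set m := M.toNat with hm
    set R := r7.toNat with hRdef
    have hNat : 3^k*5^l*7^m = 3^e3*5^e5*7^e7*R := by
      have hc : ((3^k*5^l*7^m : ℕ) : ℤ) = ((3^e3*5^e5*7^e7*R : ℕ) : ℤ) := by
        push_cast
        rw [hEq, hf3, hf5, hf7, hR]
        ring
      exact_mod_cast hc
    have hd7R : ¬ 7 ∣ R := fun h => hn7 (by rw [hR]; exact_mod_cast h)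
    have hr7dvd3 : (3:ℤ) ∣ r7 → (3:ℤ) ∣ r3 := fun h => by
      rw [hf5, hf7]; exact Dvd.dvd.mul_left (Dvd.dvd.mul_left h _) _
    have hr7dvd5 : (5:ℤ) ∣ r7 → (5:ℤ) ∣ r5 := fun h => by
      rw [hf7]; exact Dvd.dvd.mul_left h _
    have hd3R : ¬ 3 ∣ R := fun h => hn3 (hr7dvd3 (by rw [hR]; exact_mod_cast h))
    have hd5R : ¬ 5 ∣ R := fun h => hn5 (hr7dvd5 (by rw [hR]; exact_mod_cast h))
    have hRdvd : R ∣ 3^k*5^l*7^m := ⟨3^e3*5^e5*7^e7, by rw [hNat]; ring⟩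
    have hR1 : R = 1 := coprime_kill R k l m hd3R hd5R hd7R hRdvd
    have hr71 : r7 = 1 := by rw [hR, hR1]; norm_num
    rw [hR1, mul_one] at hNat
    obtain ⟨h1, h2, h3⟩ := pow357_inj k l m e3 e5 e7 hNat
    refine ⟨hr71, by omega, by omega, by omega⟩
  · rintro ⟨hr71, rfl, rfl, rfl⟩
    rw [hf3, hf5, hf7, hr71]
    simp only [Int.toNat_natCast]
    ring

lemma main_eq (i : Int) : find_variants i = find_variants_alt i := by
  rcases lt_or_ge i 1 with hi | hi
  · rw [A_eq]
    unfold find_variants_alt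
    rw [if_pos hi]
    apply List.flatMap_eq_nil_iff.mpr
    intro K _
    apply List.flatMap_eq_nil_iff.mpr
    intro L _
    have hfil : (PySem.List.pyRange 0 (PySem.Int.truncdiv i 7 + 1) 1).filter
        (fun M => (3:Int) ^ K.toNat * 5 ^ L.toNat * 7 ^ M.toNat == i) = [] := by
      apply List.filter_eq_nil_iff.mpr
      intro M _
      simp only [beq_iff_eq]
      intro hEq
      have hpos : (0:ℤ) < 3 ^ K.toNat * 5 ^ L.toNat * 7 ^ M.toNat := by positivity
      omega
    rw [hfil, List.map_nil]
  · obtain ⟨e3, r3, hs3, hf3, hr3, hn3⟩ := strip_spec 3 i (by norm_num) hi 0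
    obtain ⟨e5, r5, hs5, hf5, hr5, hn5⟩ := strip_spec 5 r3 (by norm_num) hr3 0
    obtain ⟨e7, r7, hs7, hf7, hr7, hn7⟩ := strip_spec 7 r5 (by norm_num) hr5 0
    have hB : find_variants_alt i = if r7 = 1 then [((e3:ℤ), (e5:ℤ), (e7:ℤ))] else [] := by
      unfold find_variants_alt
      rw [if_neg (by omega)]
      simp only [hs3, hs5, hs7, zero_add]
    have hcond : ∀ K L M : Int, 0 ≤ K → 0 ≤ L → 0 ≤ M →
        ((3:Int) ^ K.toNat * 5 ^ L.toNat * 7 ^ M.toNat = i ↔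
          r7 = 1 ∧ K = (e3:ℤ) ∧ L = (e5:ℤ) ∧ M = (e7:ℤ)) :=
      fun K L M hK hL hM => cond_iff i hi e3 e5 e7 r3 r5 r7 hf3 hn3 hf5 hn5 hf7 hr7 hn7 K L M hK hL hM
    rw [hB, A_eq]
    by_cases hr : r7 = 1
    · rw [if_pos hr]
      have hd3 : (3:ℤ)^e3 ∣ i := ⟨r3, hf3⟩
      have hd5 : (5:ℤ)^e5 ∣ i := ⟨3^e3*7^e7*r7, by rw [hf3, hf5, hf7]; ring⟩
      have hd7 : (7:ℤ)^e7 ∣ i := ⟨3^e3*5^e5*r7, by rw [hf3, hf5, hf7]; ring⟩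
      have hm3 : (e3:ℤ) ∈ PySem.List.pyRange 0 (PySem.Int.truncdiv i 3 + 1) 1 :=
        PySem.List.mem_pyRange_one.mpr ⟨by positivity,
          by have := exp_le_truncdiv i 3 hi (by norm_num) e3 hd3; omega⟩
      have hm5 : (e5:ℤ) ∈ PySem.List.pyRange 0 (PySem.Int.truncdiv i 5 + 1) 1 :=
        PySem.List.mem_pyRange_one.mpr ⟨by positivity,
          by have := exp_le_truncdiv i 5 hi (by norm_num) e5 hd5; omega⟩
      have hm7 : (e7:ℤ) ∈ PySem.List.pyRange 0 (PySem.Int.truncdiv i 7 + 1) 1 :=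
        PySem.List.mem_pyRange_one.mpr ⟨by positivity,
          by have := exp_le_truncdiv i 7 hi (by norm_num) e7 hd7; omega⟩
      have side3 : ∀ K ∈ PySem.List.pyRange 0 (PySem.Int.truncdiv i 3 + 1) 1, K ≠ (e3:ℤ) →
          (PySem.List.pyRange 0 (PySem.Int.truncdiv i 5 + 1) 1).flatMap (fun L =>
            ((PySem.List.pyRange 0 (PySem.Int.truncdiv i 7 + 1) 1).filter
                (fun M => (3:Int) ^ K.toNat * 5 ^ L.toNat * 7 ^ M.toNat == i)).map
              (fun M => (K, L, M))) = [] := by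
        intro K hKm hKne
        apply List.flatMap_eq_nil_iff.mpr
        intro L hLm
        have hK0 : 0 ≤ K := (PySem.List.mem_pyRange_one.mp hKm).1
        have hL0 : 0 ≤ L := (PySem.List.mem_pyRange_one.mp hLm).1
        have hfil : (PySem.List.pyRange 0 (PySem.Int.truncdiv i 7 + 1) 1).filter
            (fun M => (3:Int) ^ K.toNat * 5 ^ L.toNat * 7 ^ M.toNat == i) = [] := by
          apply List.filter_eq_nil_iff.mpr
          intro M hMm
          have hM0 : 0 ≤ M := (PySem.List.mem_pyRange_one.mp hMm).1
          simp only [beq_iff_eq]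
          intro hEq
          exact hKne ((hcond K L M hK0 hL0 hM0).mp hEq).2.1
        rw [hfil, List.map_nil]
      have side5 : ∀ L ∈ PySem.List.pyRange 0 (PySem.Int.truncdiv i 5 + 1) 1, L ≠ (e5:ℤ) →
          ((PySem.List.pyRange 0 (PySem.Int.truncdiv i 7 + 1) 1).filter
              (fun M => (3:Int) ^ ((e3:ℤ)).toNat * 5 ^ L.toNat * 7 ^ M.toNat == i)).map
            (fun M => (((e3:ℤ)), L, M)) = [] := by
        intro L hLm hLne
        have hL0 : 0 ≤ L := (PySem.List.mem_pyRange_one.mp hLm).1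
        have hfil : (PySem.List.pyRange 0 (PySem.Int.truncdiv i 7 + 1) 1).filter
            (fun M => (3:Int) ^ ((e3:ℤ)).toNat * 5 ^ L.toNat * 7 ^ M.toNat == i) = [] := by
          apply List.filter_eq_nil_iff.mpr
          intro M hMm
          have hM0 : 0 ≤ M := (PySem.List.mem_pyRange_one.mp hMm).1
          simp only [beq_iff_eq]
          intro hEq
          exact hLne ((hcond _ L M (by positivity) hL0 hM0).mp hEq).2.2.1
        rw [hfil, List.map_nil]
      have side7 : ∀ M ∈ PySem.List.pyRange 0 (PySem.Int.truncdiv i 7 + 1) 1,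
          (((3:Int) ^ ((e3:ℤ)).toNat * 5 ^ ((e5:ℤ)).toNat * 7 ^ M.toNat == i) = true ↔ M = (e7:ℤ)) := by
        intro M hMm
        have hM0 : 0 ≤ M := (PySem.List.mem_pyRange_one.mp hMm).1
        simp only [beq_iff_eq]
        constructor
        · intro hEq
          exact ((hcond _ _ M (by positivity) (by positivity) hM0).mp hEq).2.2.2
        · rintro rfl
          exact (hcond _ _ _ (by positivity) (by positivity) (by positivity)).mpr
            ⟨hr, rfl, rfl, rfl⟩
      rw [flatMap_single _ _ ((e3:ℤ)) (PySem.List.nodup_pyRange_one _ _) hm3 side3,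
        flatMap_single _ _ ((e5:ℤ)) (PySem.List.nodup_pyRange_one _ _) hm5 side5,
        filter_single _ _ ((e7:ℤ)) (PySem.List.nodup_pyRange_one _ _) hm7 side7,
        List.map_singleton]
    · rw [if_neg hr]
      apply List.flatMap_eq_nil_iff.mpr
      intro K hKm
      apply List.flatMap_eq_nil_iff.mpr
      intro L hLm
      have hK0 : 0 ≤ K := (PySem.List.mem_pyRange_one.mp hKm).1
      have hL0 : 0 ≤ L := (PySem.List.mem_pyRange_one.mp hLm).1
      have hfil : (PySem.List.pyRange 0 (PySem.Int.truncdiv i 7 + 1) 1).filter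
          (fun M => (3:Int) ^ K.toNat * 5 ^ L.toNat * 7 ^ M.toNat == i) = [] := by
        apply List.filter_eq_nil_iff.mpr
        intro M hMm
        have hM0 : 0 ≤ M := (PySem.List.mem_pyRange_one.mp hMm).1
        simp only [beq_iff_eq]
        intro hEq
        exact hr ((hcond K L M hK0 hL0 hM0).mp hEq).1
      rw [hfil, List.map_nil]

-- ===== VERDICT (by name: the statement is the Claim_ definition above) =====
theorem find_variants_spec : Claim_equal_find_variants := by
  intro i _
  unfold Spec_find_variants
  exact main_eq i
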